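-- pv_equiv track=rewrite | github.com/rh2975/deepvariant | deepvariant/postprocess_variants.py | expected_alt_allele_indices
-- ===== SOURCE A (Python) =====
-- import itertools
--
-- def expected_alt_allele_indices(num_alternate_bases):
--   """Returns (sorted) expected list of alt_allele_indices, given #alt bases."""
--   num_alleles = num_alternate_bases + 1
--   alt_allele_indices_list = [
--       sorted(list(set(x) - {0}))
--       for x in itertools.combinations(range(num_alleles), 2)
--   ]
--   # alt_allele_indices starts from 0, where 0 refers to the first alt allele.
--   # pylint: disable=g-complex-comprehension
--   return sorted([[i - 1
--                   for i in alt_allele_indices]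
--                  for alt_allele_indices in alt_allele_indices_list])
-- ===== SOURCE B (Python) =====
-- def expected_alt_allele_indices(num_alternate_bases):
--   """Returns (sorted) expected list of alt_allele_indices, given #alt bases."""
--   # Emit the singleton [i] followed by the pairs [i, j] (j > i) for each i in
--   # increasing order: that is already the sorted order, so no set arithmetic,
--   # index shifting or final sort is needed.
--   result = []
--   for i in range(num_alternate_bases):
--     result.append([i])
--     for j in range(i + 1, num_alternate_bases):
--       result.append([i, j])
--   return result
-- ===== Notes on version B (the rewrite author's own statement) =====
-- stated objective: simpler
-- what changed: B emits each singleton followed by its larger-index pairs directly in increasing order, dropping A's enumeration of two-element combinations of an enlarged range, its set-difference removal of the zero allele, the index shift and the final sort.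
import Mathlib
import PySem

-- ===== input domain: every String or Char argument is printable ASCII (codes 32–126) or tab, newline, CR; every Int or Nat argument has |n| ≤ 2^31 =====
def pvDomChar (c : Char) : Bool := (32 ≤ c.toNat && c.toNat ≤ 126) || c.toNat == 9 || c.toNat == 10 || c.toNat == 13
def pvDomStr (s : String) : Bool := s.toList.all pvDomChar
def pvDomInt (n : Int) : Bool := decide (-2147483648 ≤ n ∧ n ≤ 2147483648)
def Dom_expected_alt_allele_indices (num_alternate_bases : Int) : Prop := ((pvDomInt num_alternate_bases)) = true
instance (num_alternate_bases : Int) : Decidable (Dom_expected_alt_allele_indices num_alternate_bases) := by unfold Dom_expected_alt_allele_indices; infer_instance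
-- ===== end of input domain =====

-- B emits each singleton followed by its larger-index pairs directly in increasing order,
-- dropping A's combinations/set-difference/shift/sort pipeline (objective: simpler; no final sort).

-- ===== PORT A =====
def expected_alt_allele_indices (num_alternate_bases : Int) : List (List Int) :=
  let num_alleles := num_alternate_bases + 1
  -- itertools.combinations(range(num_alleles), 2): pairs (i, j), i < j, in lexicographic order
  let combos : List (Int × Int) :=
    (PySem.List.pyRange 0 num_alleles 1).flatMap (fun i =>
      (PySem.List.pyRange (i + 1) num_alleles 1).map (fun j => (i, j)))
  let alt_allele_indices_list := combos.map (fun x =>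
    PySem.List.sorted (PySem.Set.diff (PySem.Set.ofList [x.1, x.2]) (PySem.Set.ofList [0])) (fun v => v) false)
  PySem.List.sorted (alt_allele_indices_list.map (fun l => l.map (fun i => i - 1))) (fun v => v) false

-- ===== PORT B =====
def expected_alt_allele_indices_alt (num_alternate_bases : Int) : List (List Int) :=
  (PySem.List.pyRange 0 num_alternate_bases 1).foldl (fun acc i =>
    (PySem.List.pyRange (i + 1) num_alternate_bases 1).foldl
      (fun acc2 j => acc2 ++ [[i, j]]) (acc ++ [[i]])) []

-- ===== PRECONDITION & SPEC =====
def Spec_expected_alt_allele_indices (num_alternate_bases : Int) (out : List (List Int)) : Prop := out = expected_alt_allele_indices_alt num_alternate_bases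
instance (num_alternate_bases : Int) (out : List (List Int)) : Decidable (Spec_expected_alt_allele_indices num_alternate_bases out) := by unfold Spec_expected_alt_allele_indices; infer_instance

-- ===== CLAIM (what is proved, stated in full; the proofs are below) =====
def Claim_equal_expected_alt_allele_indices : Prop := ∀ (num_alternate_bases : Int), Dom_expected_alt_allele_indices num_alternate_bases → Spec_expected_alt_allele_indices num_alternate_bases (expected_alt_allele_indices num_alternate_bases)

-- ===== LEMMAS AND PROOFS =====

-- the pairs [i, j] block for a fixed i, and the canonical (already sorted) target list
def pvPairs (i n : Int) : List (List Int) :=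
  (PySem.List.pyRange (i + 1) n 1).map (fun j => ([i, j] : List Int))

def pvS (n : Int) : List (List Int) :=
  (PySem.List.pyRange 0 n 1).flatMap (fun i => [i] :: pvPairs i n)

-- foldl that appends one element per step is a map
theorem pv_foldl_append_map {α β : Type} (l : List α) (f : α → β) (init : List β) :
    l.foldl (fun a x => a ++ [f x]) init = init ++ l.map f := by
  induction l generalizing init with
  | nil => simp
  | cons x xs ih => simp [List.foldl_cons, ih]

-- foldl that appends a block per step is a flatMap
theorem pv_foldl_append_flatMap {α β : Type} (l : List α) (F : α → List β) (init : List β) :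
    l.foldl (fun a x => a ++ F x) init = init ++ l.flatMap F := by
  induction l generalizing init with
  | nil => simp
  | cons x xs ih => simp [List.foldl_cons, ih]

theorem pv_alt_eq_S (n : Int) : expected_alt_allele_indices_alt n = pvS n := by
  unfold expected_alt_allele_indices_alt pvS
  have hstep : ∀ (acc : List (List Int)) (i : Int),
      (PySem.List.pyRange (i + 1) n 1).foldl (fun acc2 j => acc2 ++ [[i, j]]) (acc ++ [[i]])
        = acc ++ ([i] :: pvPairs i n) := by
    intro acc i
    rw [pv_foldl_append_map (f := fun j => ([i, j] : List Int))]
    simp [pvPairs]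
  calc (PySem.List.pyRange 0 n 1).foldl (fun acc i =>
          (PySem.List.pyRange (i + 1) n 1).foldl (fun acc2 j => acc2 ++ [[i, j]]) (acc ++ [[i]])) []
      = (PySem.List.pyRange 0 n 1).foldl (fun acc i => acc ++ ([i] :: pvPairs i n)) [] := by
        have hfun : (fun (acc : List (List Int)) (i : Int) =>
            (PySem.List.pyRange (i + 1) n 1).foldl (fun acc2 j => acc2 ++ [[i, j]]) (acc ++ [[i]]))
            = fun acc i => acc ++ ([i] :: pvPairs i n) := by
          funext acc i; exact hstep acc i
        rw [hfun]
    _ = [] ++ (PySem.List.pyRange 0 n 1).flatMap (fun i => [i] :: pvPairs i n) :=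
        pv_foldl_append_flatMap _ _ _
    _ = _ := by simp

-- evaluating A's per-combination set arithmetic
theorem pv_g_zero (j : Int) (h : 0 < j) :
    PySem.List.sorted (PySem.Set.diff (PySem.Set.ofList [(0:Int), j]) (PySem.Set.ofList [0])) (fun v => v) false = [j] := by
  have hj : ¬ (j = 0) := by omega
  simp [PySem.Set.ofList, PySem.Set.add, PySem.Set.diff, PySem.Set.contains, PySem.Set.empty,
    PySem.List.sorted, PySem.List.insertBy, List.filter, hj]

theorem pv_g_pos (i j : Int) (h0 : 0 < i) (h : i < j) :
    PySem.List.sorted (PySem.Set.diff (PySem.Set.ofList [i, j]) (PySem.Set.ofList [0])) (fun v => v) false = [i, j] := by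
  have h1 : ¬ (j = i) := by omega
  have h2 : ¬ (i = 0) := by omega
  have h3 : ¬ (j = 0) := by omega
  have h4 : ¬ (j < i) := by omega
  simp [PySem.Set.ofList, PySem.Set.add, PySem.Set.diff, PySem.Set.contains, PySem.Set.empty,
    PySem.List.sorted, PySem.List.insertBy, List.filter, h1, h2, h3, h4]

-- shifting a unit-step range by one
theorem pv_range_shift (a b : Int) :
    PySem.List.pyRange (a + 1) (b + 1) 1 = (PySem.List.pyRange a b 1).map (· + 1) := by
  have hd : b + 1 - (a + 1) = b - a := by ring
  rw [PySem.List.pyRange_one, PySem.List.pyRange_one, hd, List.map_map]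
  exact List.map_congr_left (fun k _ => by simp; ring)

-- the unsorted list A builds is singles ++ pair blocks
theorem pv_A_unsorted (n : Int) :
    (((PySem.List.pyRange 0 (n + 1) 1).flatMap (fun i =>
        (PySem.List.pyRange (i + 1) (n + 1) 1).map (fun j => ((i : Int), (j : Int))))).map (fun x =>
      PySem.List.sorted (PySem.Set.diff (PySem.Set.ofList [x.1, x.2]) (PySem.Set.ofList [0])) (fun v => v) false)).map
        (fun l => l.map (fun i => i - 1))
      = (PySem.List.pyRange 0 n 1).map (fun i => ([i] : List Int))
        ++ (PySem.List.pyRange 0 n 1).flatMap (fun i => pvPairs i n) := by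
  by_cases hn : n ≤ 0
  · have h1 : PySem.List.pyRange 0 n 1 = [] := PySem.List.pyRange_one_eq_nil hn
    rcases (lt_or_eq_of_le hn) with h | h
    · rw [PySem.List.pyRange_one_eq_nil (by omega : n + 1 ≤ 0)]; simp [h1]
    · subst h
      rw [PySem.List.pyRange_one_cons (by norm_num), PySem.List.pyRange_one_eq_nil (by norm_num)]
      simp
  · replace hn : 0 < n := by omega
    have hshift : PySem.List.pyRange 1 (n + 1) 1 = (PySem.List.pyRange 0 n 1).map (· + 1) := by
      have := pv_range_shift 0 n; simpa using this
    rw [PySem.List.pyRange_one_cons (by omega : (0:Int) < n + 1)]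
    rw [List.flatMap_cons, List.map_append, List.map_append, List.map_map, List.map_map]
    simp only [zero_add]
    congr 1
    · -- the i = 0 block gives the singletons
      rw [hshift, List.map_map]
      exact List.map_congr_left (fun j hj => by
        have hj0 : 0 ≤ j := by
          rcases PySem.List.mem_pyRange_one.mp hj with ⟨h1, _⟩; omega
        simp [pv_g_zero (j + 1) (by omega)])
    · -- the i ≥ 1 blocks give the pair blocks
      simp only [List.map_flatMap, List.map_map]
      rw [hshift, List.flatMap_map]
      apply List.flatMap_congr
      intro i hi
      have hi0 : 0 ≤ i := by
        rcases PySem.List.mem_pyRange_one.mp hi with ⟨h1, _⟩; omega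
      rw [pv_range_shift (i + 1) n, pvPairs]
      simp only [List.map_map]
      exact List.map_congr_left (fun j hj => by
        have hij : i + 1 ≤ j := by
          rcases PySem.List.mem_pyRange_one.mp hj with ⟨h1, _⟩; omega
        simp [pv_g_pos (i + 1) (j + 1) (by omega) (by omega)])

-- a sort's tie-breaking Decidable instance is irrelevant to its value
theorem pv_sorted_irrel {A K : Type} [LT K] (d1 d2 : DecidableLT K) (xs : List A) (key : A → K) (rev : Bool) :
    @PySem.List.sorted A K _ d1 xs key rev = @PySem.List.sorted A K _ d2 xs key rev := by
  have h : d1 = d2 := by funext a b; exact Subsingleton.elim _ _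
  rw [h]

-- interleaving singles with their pair blocks is a permutation of singles ++ all pair blocks
theorem pv_perm_interleave {α β : Type} (xs : List α) (f : α → β) (g : α → List β) :
    (xs.map f ++ xs.flatMap g).Perm (xs.flatMap fun x => f x :: g x) := by
  induction xs with
  | nil => simp
  | cons x xs ih =>
    simp only [List.map_cons, List.flatMap_cons, List.cons_append]
    refine List.Perm.cons _ ?_
    exact (List.perm_append_comm_assoc _ _ _).trans (List.Perm.append_left (g x) ih)

-- strict lexicographic sortedness of the canonical list
theorem pv_pairwise_flatMap (xs : List Int) (F : Int → List (List Int))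
    (hx : xs.Pairwise (· < ·))
    (hin : ∀ i ∈ xs, (F i).Pairwise (· < ·))
    (hhead : ∀ i, ∀ u ∈ F i, ∃ t, u = i :: t) :
    (xs.flatMap F).Pairwise (· < ·) := by
  induction xs with
  | nil => simp
  | cons x xs ih =>
    rw [List.flatMap_cons, List.pairwise_append]
    rcases List.pairwise_cons.mp hx with ⟨hxlt, hxs⟩
    refine ⟨hin x (by simp), ih hxs (fun i hi => hin i (by simp [hi])), ?_⟩
    intro u hu v hv
    rcases List.mem_flatMap.mp hv with ⟨i, hixs, hvFi⟩
    rcases hhead x u hu with ⟨t, rfl⟩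
    rcases hhead i v hvFi with ⟨t', rfl⟩
    rw [List.cons_lt_cons_iff]
    exact Or.inl (hxlt i hixs)

theorem pv_S_pairwise (n : Int) : (pvS n).Pairwise (· < ·) := by
  apply pv_pairwise_flatMap _ _ (PySem.List.pairwise_lt_pyRange_one _ _)
  · intro i _
    rw [List.pairwise_cons]
    constructor
    · intro v hv
      rcases List.mem_map.mp hv with ⟨j, _, rfl⟩
      rw [List.cons_lt_cons_iff]
      exact Or.inr ⟨rfl, List.nil_lt_cons _ _⟩
    · refine List.Pairwise.map _ ?_ (PySem.List.pairwise_lt_pyRange_one _ _)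
      intro a b hab
      rw [List.cons_lt_cons_iff]
      exact Or.inr ⟨rfl, by rw [List.cons_lt_cons_iff]; exact Or.inl hab⟩
  · intro i u hu
    rcases List.mem_cons.mp hu with h | h
    · exact ⟨[], h⟩
    · rcases List.mem_map.mp h with ⟨j, _, rfl⟩
      exact ⟨[j], rfl⟩

theorem pv_A_eq_S (n : Int) : expected_alt_allele_indices n = pvS n := by
  have hperm : ((PySem.List.pyRange 0 n 1).map (fun i => ([i] : List Int))
      ++ (PySem.List.pyRange 0 n 1).flatMap (fun i => pvPairs i n)).Perm (pvS n) :=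
    pv_perm_interleave (PySem.List.pyRange 0 n 1) (fun i => ([i] : List Int)) (fun i => pvPairs i n)
  show PySem.List.sorted _ _ false = pvS n
  rw [pv_A_unsorted n, pv_sorted_irrel _ (LinearOrder.toDecidableLT)]
  exact PySem.List.sorted_eq_of_perm_of_pairwise_lt _ _ _ hperm.symm (pv_S_pairwise n)

-- ===== VERDICT (by name: the statement is the Claim_ definition above) =====
theorem expected_alt_allele_indices_spec : Claim_equal_expected_alt_allele_indices := by
  intro n _
  unfold Spec_expected_alt_allele_indices
  rw [pv_A_eq_S, pv_alt_eq_S]
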